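-- pv_equiv track=rewrite | github.com/zhufq00/mcnc | tools/common.py | split_fn
-- ===== SOURCE A (Python) =====
-- def split_fn(fn_list,_fn):
--     flag = 0
--     res = []
--     for fn in fn_list:
--         if flag == 1:
--             res.append(fn)
--         if fn == _fn:
--             flag = 1
--     return res
-- ===== SOURCE B (Python) =====
-- def split_fn(fn_list, _fn):
--     try:
--         i = fn_list.index(_fn)
--     except ValueError:
--         return []
--     return fn_list[i + 1:]
-- ===== Notes on version B (the rewrite author's own statement) =====
-- stated objective: simpler
-- what changed: B locates the first occurrence with list.index and returns the tail slice fn_list[i+1:] in one shaped operation, instead of A's element-by-element scan that threads a boolean gate flag and appends to an accumulator.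
import Mathlib
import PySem

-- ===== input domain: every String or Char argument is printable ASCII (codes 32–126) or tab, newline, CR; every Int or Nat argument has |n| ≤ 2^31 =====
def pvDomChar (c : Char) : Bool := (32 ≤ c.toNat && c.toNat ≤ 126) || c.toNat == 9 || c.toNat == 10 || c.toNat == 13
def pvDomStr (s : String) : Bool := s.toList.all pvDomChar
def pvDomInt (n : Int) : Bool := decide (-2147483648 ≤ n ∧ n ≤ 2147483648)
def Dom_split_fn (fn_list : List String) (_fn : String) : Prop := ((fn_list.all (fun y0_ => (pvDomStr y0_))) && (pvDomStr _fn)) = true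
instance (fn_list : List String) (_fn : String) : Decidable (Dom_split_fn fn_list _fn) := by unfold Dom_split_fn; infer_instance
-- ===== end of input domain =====

-- B replaces A's gate-flag scan by find-first-index then one tail slice (objective: simpler).

-- ===== PORT A =====
-- A: flag/res accumulator threaded through the loop; append happens under the old flag,
-- then the flag is updated when fn == _fn.
def split_fn (fn_list : List String) (_fn : String) : List String :=
  (fn_list.foldl
    (fun (st : Bool × List String) fn =>
      let res := if st.1 then st.2 ++ [fn] else st.2
      let flag := if fn == _fn then true else st.1
      (flag, res))
    (false, [])).2

-- ===== PORT B =====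
-- B: first index of _fn (list.index / ValueError → []), then the slice fn_list[i+1:].
def split_fn_alt (fn_list : List String) (_fn : String) : List String :=
  match PySem.List.index? fn_list _fn with
  | none => []
  | some i => PySem.List.slice fn_list (some ((i : Int) + 1)) none

-- ===== PRECONDITION & SPEC =====
def Spec_split_fn (fn_list : List String) (_fn : String) (out : List String) : Prop := out = split_fn_alt fn_list _fn
instance (fn_list : List String) (_fn : String) (out : List String) : Decidable (Spec_split_fn fn_list _fn out) := by unfold Spec_split_fn; infer_instance

-- ===== CLAIM (what is proved, stated in full; the proofs are below) =====
def Claim_equal_split_fn : Prop := ∀ (fn_list : List String) (_fn : String), Dom_split_fn fn_list _fn → Spec_split_fn fn_list _fn (split_fn fn_list _fn)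

-- ===== LEMMAS AND PROOFS =====

-- once the flag is set, A appends every remaining element
theorem split_fn_flag_true (l : List String) (_fn : String) (res : List String) :
    (l.foldl
      (fun (st : Bool × List String) fn =>
        let r := if st.1 then st.2 ++ [fn] else st.2
        let flag := if fn == _fn then true else st.1
        (flag, r))
      (true, res)).2 = res ++ l := by
  induction l generalizing res with
  | nil => simp
  | cons x xs ih =>
    rw [List.foldl_cons]
    simp only [if_true]
    rw [show ((if (x == _fn) = true then true else true), res ++ [x]) = ((true : Bool), res ++ [x]) by
      by_cases h : x = _fn <;> simp [h]]
    calc (List.foldl (fun (st : Bool × List String) fn =>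
            ((if (fn == _fn) = true then true else st.1), if st.1 = true then st.2 ++ [fn] else st.2))
            (true, res ++ [x]) xs).2 = (res ++ [x]) ++ xs := ih (res ++ [x])
      _ = res ++ x :: xs := by simp

theorem split_fn_eq_alt (l : List String) (_fn : String) :
    split_fn l _fn = split_fn_alt l _fn := by
  induction l with
  | nil => simp [split_fn, split_fn_alt, PySem.List.index?]
  | cons x xs ih =>
    unfold split_fn
    rw [List.foldl_cons]
    by_cases hx : x = _fn
    · subst hx
      have hidx : PySem.List.index? (x :: xs) x = some 0 := PySem.List.index?_cons_self x xs
      simp only [split_fn_alt, hidx]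
      have hst : ((if (x == x) = true then true else false), if (false : Bool) = true then ([] : List String) ++ [x] else []) = ((true : Bool), ([] : List String)) := by simp
      rw [hst, split_fn_flag_true]
      have : ((0 : Nat) : Int) + 1 = ((1 : Nat) : Int) := by norm_num
      rw [this, PySem.List.slice_from_natCast]
      simp
    · have h1 : PySem.List.index? (x :: xs) _fn = (PySem.List.index? xs _fn).map (· + 1) :=
        PySem.List.index?_cons_of_ne xs hx
      have hst : ((if (x == _fn) = true then true else false), if (false : Bool) = true then ([] : List String) ++ [x] else []) = ((false : Bool), ([] : List String)) := by simp [hx]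
      rw [hst]
      have ih' : (List.foldl (fun (st : Bool × List String) fn =>
          ((if (fn == _fn) = true then true else st.1), if st.1 = true then st.2 ++ [fn] else st.2))
          (false, []) xs).2 = split_fn_alt xs _fn := ih
      rw [ih']
      unfold split_fn_alt
      rw [h1]
      cases h : PySem.List.index? xs _fn with
      | none => simp
      | some i =>
        simp only [Option.map_some]
        have e1 : ((i : Nat) : Int) + 1 = (((i + 1 : Nat)) : Int) := by push_cast; ring
        have e2 : (((i + 1 : Nat)) : Int) + 1 = (((i + 2 : Nat)) : Int) := by push_cast; ring
        rw [e1, e2, PySem.List.slice_from_natCast, PySem.List.slice_from_natCast]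
        simp

-- ===== VERDICT (by name: the statement is the Claim_ definition above) =====
theorem split_fn_spec : Claim_equal_split_fn := by
  intro l f _
  exact split_fn_eq_alt l f
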